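-- pv_equiv track=rewrite | github.com/schmitech/orbit | server/routes/admin_routes.py | _find_adapter_block
-- ===== SOURCE A (Python) =====
-- def _find_adapter_block(lines: list[str], adapter_name: str) -> tuple[int, int]:
--     """Find start/end line indices of a single adapter entry in YAML content.
--
--     Returns (start, end) where lines[start:end] is the adapter block.
--     """
--     start = None
--     start_indent = 0
--     for i, line in enumerate(lines):
--         stripped = line.lstrip()
--         if not stripped.startswith("- name:"):
--             continue
--         name_val = stripped[len("- name:"):].strip().strip('"').strip("'")
--         if name_val == adapter_name:
--             start = i
--             start_indent = len(line) - len(stripped)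
--             break
--
--     if start is None:
--         return -1, -1
--
--     end = len(lines)
--     for i in range(start + 1, len(lines)):
--         stripped = lines[i].lstrip()
--         if not stripped:
--             continue
--         if stripped.startswith("#"):
--             continue
--         current_indent = len(lines[i]) - len(stripped)
--         if stripped.startswith("- ") and current_indent <= start_indent:
--             end = i
--             break
--         if current_indent < start_indent:
--             end = i
--             break
--
--     while end > start + 1 and lines[end - 1].strip() == "":
--         end -= 1
--
--     return start, end
-- ===== SOURCE B (Python) =====
-- def _find_adapter_block(lines: list[str], adapter_name: str) -> tuple[int, int]:
--     """Single linear pass with explicit state: find the matching '- name:' item,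
--     then scan forward tracking the index just past the last non-blank line."""
--     start = -1
--     start_indent = 0
--     last = 0
--     for i, line in enumerate(lines):
--         stripped = line.lstrip()
--         if start < 0:
--             if stripped.startswith("- name:"):
--                 if stripped[7:].strip().strip('"').strip("'") == adapter_name:
--                     start = i
--                     start_indent = len(line) - len(stripped)
--                     last = i + 1
--         else:
--             if not stripped:
--                 continue
--             if stripped.startswith("#"):
--                 last = i + 1
--                 continue
--             indent = len(line) - len(stripped)
--             if (stripped.startswith("- ") and indent <= start_indent) or indent < start_indent:
--                 return start, last
--             last = i + 1
--     if start < 0: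
--         return -1, -1
--     return start, last
-- ===== Notes on version B (the rewrite author's own statement) =====
-- stated objective: simpler
-- what changed: A's three passes (find the matching '- name:' line, scan forward for the block end, then back off over trailing blank lines) are fused into one enumerated pass with explicit state that tracks the index just past the last non-blank line, so the trailing-blank trim loop disappears.
import Mathlib
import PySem

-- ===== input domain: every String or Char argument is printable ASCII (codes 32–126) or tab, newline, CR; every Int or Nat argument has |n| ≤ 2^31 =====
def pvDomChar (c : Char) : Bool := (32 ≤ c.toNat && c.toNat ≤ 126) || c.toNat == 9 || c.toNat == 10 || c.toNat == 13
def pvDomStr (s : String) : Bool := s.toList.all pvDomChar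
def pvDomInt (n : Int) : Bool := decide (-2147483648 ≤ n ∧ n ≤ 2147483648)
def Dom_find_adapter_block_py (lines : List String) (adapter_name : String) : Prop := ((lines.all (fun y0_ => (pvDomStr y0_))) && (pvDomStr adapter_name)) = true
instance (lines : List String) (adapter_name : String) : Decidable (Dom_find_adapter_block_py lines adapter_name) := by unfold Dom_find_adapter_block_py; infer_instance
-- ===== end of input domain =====

-- B fuses A's three passes (find start, scan for end, trim trailing blanks) into one
-- enumerated pass with explicit state; objective: simpler single-pass decomposition.

-- ===== PORT A =====
-- shared helper: stripped[len("- name:"):].strip().strip('"').strip("'")  (identical expression in A and B)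
def pvNameVal (st : String) : String :=
  PySem.Str.stripChars (PySem.Str.stripChars (PySem.Str.strip (PySem.Str.slice st (some 7) none)) "\"") "'"

-- A's first loop: first i whose lstripped line starts with "- name:" and matches; returns (i, start_indent)
def pvFindStart (name : String) : List String → Nat → Option (Nat × Int)
  | [], _ => none
  | l :: t, i =>
    let st := PySem.Str.lstrip l
    if PySem.Str.startswith st "- name:" = true then
      if pvNameVal st = name then some (i, PySem.Str.len l - PySem.Str.len st)
      else pvFindStart name t (i + 1)
    else pvFindStart name t (i + 1)

-- A's second loop over i in range(start+1, len(lines)), transliterated over the suffix lines.drop (start+1)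
def pvScanEnd (si : Int) : List String → Nat → Nat
  | [], i => i
  | l :: t, i =>
    let st := PySem.Str.lstrip l
    if st = "" then pvScanEnd si t (i + 1)
    else if PySem.Str.startswith st "#" = true then pvScanEnd si t (i + 1)
    else
      let ci := PySem.Str.len l - PySem.Str.len st
      if PySem.Str.startswith st "- " = true ∧ ci ≤ si then i
      else if ci < si then i
      else pvScanEnd si t (i + 1)

-- A's trailing while loop: while end > start+1 and lines[end-1].strip() == "": end -= 1
def pvTrim (L : List String) (b e : Nat) : Nat :=
  if h : b < e ∧ PySem.Str.strip (L.getD (e - 1) "") = "" then pvTrim L b (e - 1) else e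
termination_by e
decreasing_by omega

def find_adapter_block_py (lines : List String) (adapter_name : String) : Int × Int :=
  match pvFindStart adapter_name lines 0 with
  | none => (-1, -1)
  | some (s, si) =>
    let e := pvScanEnd si (lines.drop (s + 1)) (s + 1)
    ((s : Int), (pvTrim lines (s + 1) e : Int))

-- ===== PORT B =====
-- B's single loop; state: start (-1 = not found yet), start_indent, last (index past last non-blank line)
def pvLoopB (name : String) : List String → Nat → Int → Int → Int → Int × Int
  | [], _, start, _, last => if start < 0 then (-1, -1) else (start, last)
  | l :: t, i, start, si, last =>
    let st := PySem.Str.lstrip l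
    if start < 0 then
      if PySem.Str.startswith st "- name:" = true then
        if pvNameVal st = name then
          pvLoopB name t (i + 1) (i : Int) (PySem.Str.len l - PySem.Str.len st) ((i : Int) + 1)
        else pvLoopB name t (i + 1) start si last
      else pvLoopB name t (i + 1) start si last
    else
      if st = "" then pvLoopB name t (i + 1) start si last
      else if PySem.Str.startswith st "#" = true then pvLoopB name t (i + 1) start si ((i : Int) + 1)
      else
        let ind := PySem.Str.len l - PySem.Str.len st
        if (PySem.Str.startswith st "- " = true ∧ ind ≤ si) ∨ ind < si then (start, last)
        else pvLoopB name t (i + 1) start si ((i : Int) + 1)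

def find_adapter_block_py_alt (lines : List String) (adapter_name : String) : Int × Int :=
  pvLoopB adapter_name lines 0 (-1) 0 0

-- ===== PRECONDITION & SPEC =====
def Spec_find_adapter_block_py (lines : List String) (adapter_name : String) (out : Int × Int) : Prop := out = find_adapter_block_py_alt lines adapter_name
instance (lines : List String) (adapter_name : String) (out : Int × Int) : Decidable (Spec_find_adapter_block_py lines adapter_name out) := by unfold Spec_find_adapter_block_py; infer_instance

-- ===== CLAIM (what is proved, stated in full; the proofs are below) =====
def Claim_equal_find_adapter_block_py : Prop := ∀ (lines : List String) (adapter_name : String), Dom_find_adapter_block_py lines adapter_name → Spec_find_adapter_block_py lines adapter_name (find_adapter_block_py lines adapter_name)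

-- ===== LEMMAS AND PROOFS =====

theorem str_eq_empty_iff (s : String) : s = "" ↔ s.toList = [] := by
  constructor
  · rintro rfl; rfl
  · intro h
    have h2 := congrArg String.ofList h
    rwa [String.ofList_toList] at h2

theorem dropWhile_cons_head_false (p : Char → Bool) (l : List Char) (a : Char) (as : List Char)
    (h : l.dropWhile p = a :: as) : p a = false := by
  induction l with
  | nil => simp at h
  | cons c cs ih =>
    rw [List.dropWhile_cons] at h
    split at h
    · exact ih h
    · next hc => cases h; simpa using hc

theorem chars_strip_nil_iff (cs : List Char) :
    PySem.Chars.strip cs = [] ↔ PySem.Chars.lstrip cs = [] := by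
  unfold PySem.Chars.strip PySem.Chars.rstrip
  constructor
  · intro h
    have h2 : List.dropWhile PySem.Chars.isspace (PySem.Chars.lstrip cs).reverse = [] := by
      simpa using h
    rw [List.dropWhile_eq_nil_iff] at h2
    cases hcs : PySem.Chars.lstrip cs with
    | nil => rfl
    | cons a as =>
      exfalso
      have ha : PySem.Chars.isspace a = true := h2 a (by simp [hcs])
      have hf : PySem.Chars.isspace a = false :=
        dropWhile_cons_head_false _ cs a as hcs
      simp [hf] at ha
  · intro h; rw [h]; rfl

theorem strip_empty_iff (l : String) :
    (PySem.Str.strip l = "") ↔ (PySem.Str.lstrip l = "") := by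
  rw [str_eq_empty_iff, str_eq_empty_iff, PySem.Str.toList_strip, PySem.Str.toList_lstrip]
  exact chars_strip_nil_iff l.toList

theorem getD_of_drop (L : List String) (i : Nat) (l : String) (t : List String)
    (h : L.drop i = l :: t) : L.getD i "" = l := by
  have h0 : L[i]? = some l := by
    have := @List.getElem?_drop String L i 0
    rw [h] at this
    simpa using this.symm
  simp [List.getD, h0]

theorem pvTrim_nonblank (L : List String) (s i : Nat) (l : String)
    (hget : L.getD i "" = l) (hnb : ¬ PySem.Str.strip l = "") :
    pvTrim L (s + 1) (i + 1) = i + 1 := by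
  rw [pvTrim]
  rw [dif_neg]
  intro ⟨_, h2⟩
  simp only [Nat.add_sub_cancel] at h2
  rw [hget] at h2
  exact hnb h2

theorem pvTrim_blank (L : List String) (s i : Nat) (l : String)
    (hle : s + 1 ≤ i) (hget : L.getD i "" = l) (hb : PySem.Str.strip l = "") :
    pvTrim L (s + 1) (i + 1) = pvTrim L (s + 1) i := by
  rw [pvTrim]
  rw [dif_pos]
  · simp
  · refine ⟨by omega, ?_⟩
    simp only [Nat.add_sub_cancel]
    rw [hget]; exact hb

-- in-block phase: B's loop with the `last` invariant equals A's scan + trim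
theorem blockLemma (L : List String) (name : String) (s : Nat) (si : Int) :
    ∀ (t : List String) (i : Nat) (last : Int), L.drop i = t → s + 1 ≤ i →
      last = ((pvTrim L (s + 1) i : Nat) : Int) →
      pvLoopB name t i (s : Int) si last
        = ((s : Int), ((pvTrim L (s + 1) (pvScanEnd si t i) : Nat) : Int)) := by
  intro t
  induction t with
  | nil =>
    intro i last hdrop hle hlast
    simp only [pvLoopB, pvScanEnd]
    rw [if_neg (by omega)]
    rw [hlast]
  | cons l t' ih =>
    intro i last hdrop hle hlast
    have hdrop' : L.drop (i + 1) = t' := by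
      rw [← List.tail_drop, hdrop]; rfl
    have hget : L.getD i "" = l := getD_of_drop L i l t' hdrop
    simp only [pvLoopB, pvScanEnd]
    rw [if_neg (by omega : ¬ ((s : Int) < 0))]
    by_cases hblank : PySem.Str.lstrip l = ""
    · rw [if_pos hblank, if_pos hblank]
      exact ih (i + 1) last hdrop' (by omega)
        (by rw [hlast, pvTrim_blank L s i l hle hget ((strip_empty_iff l).mpr hblank)])
    · rw [if_neg hblank, if_neg hblank]
      have hnb : ¬ PySem.Str.strip l = "" := fun h => hblank ((strip_empty_iff l).mp h)
      have htr : pvTrim L (s + 1) (i + 1) = i + 1 := pvTrim_nonblank L s i l hget hnb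
      by_cases hcom : PySem.Str.startswith (PySem.Str.lstrip l) "#" = true
      · rw [if_pos hcom, if_pos hcom]
        exact ih (i + 1) ((i : Int) + 1) hdrop' (by omega) (by rw [htr]; push_cast; ring)
      · rw [if_neg hcom, if_neg hcom]
        by_cases hend1 : PySem.Str.startswith (PySem.Str.lstrip l) "- " = true ∧
            PySem.Str.len l - PySem.Str.len (PySem.Str.lstrip l) ≤ si
        · rw [if_pos hend1, if_pos (Or.inl hend1), hlast]
        · rw [if_neg hend1]
          by_cases hend2 : PySem.Str.len l - PySem.Str.len (PySem.Str.lstrip l) < si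
          · rw [if_pos hend2, if_pos (Or.inr hend2), hlast]
          · rw [if_neg hend2, if_neg (show ¬ ((PySem.Str.startswith (PySem.Str.lstrip l) "- " = true ∧ PySem.Str.len l - PySem.Str.len (PySem.Str.lstrip l) ≤ si) ∨ PySem.Str.len l - PySem.Str.len (PySem.Str.lstrip l) < si) from fun h => h.elim hend1 hend2)]
            exact ih (i + 1) ((i : Int) + 1) hdrop' (by omega) (by rw [htr]; push_cast; ring)

theorem mainLemma (L : List String) (name : String) :
    ∀ (t : List String) (i : Nat), L.drop i = t →
      pvLoopB name t i (-1) 0 0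
        = match pvFindStart name t i with
          | none => (-1, -1)
          | some (s, si) =>
            ((s : Int), ((pvTrim L (s + 1) (pvScanEnd si (L.drop (s + 1)) (s + 1)) : Nat) : Int)) := by
  intro t
  induction t with
  | nil => intro i _; simp [pvLoopB, pvFindStart]
  | cons l t' ih =>
    intro i hdrop
    have hdrop' : L.drop (i + 1) = t' := by
      rw [← List.tail_drop, hdrop]; rfl
    simp only [pvLoopB, pvFindStart]
    rw [if_pos (by omega : (-1 : Int) < 0)]
    by_cases h1 : PySem.Str.startswith (PySem.Str.lstrip l) "- name:" = true
    · rw [if_pos h1, if_pos h1]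
      by_cases h2 : pvNameVal (PySem.Str.lstrip l) = name
      · rw [if_pos h2, if_pos h2]
        have hb := blockLemma L name i (PySem.Str.len l - PySem.Str.len (PySem.Str.lstrip l))
          t' (i + 1) ((i : Int) + 1) hdrop' (by omega)
          (by rw [pvTrim]; rw [dif_neg (by omega)]; push_cast; ring)
        refine hb.trans ?_
        rw [← hdrop']
      · rw [if_neg h2, if_neg h2]
        exact ih (i + 1) hdrop'
    · rw [if_neg h1, if_neg h1]
      exact ih (i + 1) hdrop'

-- ===== VERDICT (by name: the statement is the Claim_ definition above) =====
theorem find_adapter_block_py_spec : Claim_equal_find_adapter_block_py := by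
  intro lines adapter_name _
  unfold Spec_find_adapter_block_py find_adapter_block_py find_adapter_block_py_alt
  rw [mainLemma lines adapter_name lines 0 (by simp)]
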